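-- pv_equiv track=rewrite | github.com/abems123/compilers-project | src/llvm_target/llvm_visitor.py | _string_byte_length
-- ===== SOURCE A (Python) =====
-- def _string_byte_length(s: str) -> int:
--     """
--     Berekent het aantal bytes van een string in geheugen
--     (escape sequences tellen als 1 byte).
--     """
--     length = 0
--     i = 0
--     while i < len(s):
--         if s[i] == '\\' and i + 1 < len(s):
--             i += 2
--         else:
--             i += 1
--         length += 1
--     return length
-- ===== SOURCE B (Python) =====
-- def _string_byte_length(s: str) -> int:
--     # Split on backslash and fold over the fragments: each separator backslash
--     # either starts an escape (counts 1, consuming the next char) or was itself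
--     # consumed by the previous escape (carry).
--     parts = s.split('\\')
--     count = len(parts[0])
--     carry = False
--     for p in parts[1:]:
--         if carry:
--             count += len(p)
--             carry = False
--         elif p:
--             count += len(p)
--         else:
--             count += 1
--             carry = True
--     return count
-- ===== Notes on version B (the rewrite author's own statement) =====
-- stated objective: faster
-- what changed: Instead of A's per-character index scan with +=2 jumps, B splits the string on backslash once (a single C-level str.split) and folds over the resulting fragments with a carry flag, charging each separator backslash as either an escape start or the character consumed by the previous escape.
import Mathlib
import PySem

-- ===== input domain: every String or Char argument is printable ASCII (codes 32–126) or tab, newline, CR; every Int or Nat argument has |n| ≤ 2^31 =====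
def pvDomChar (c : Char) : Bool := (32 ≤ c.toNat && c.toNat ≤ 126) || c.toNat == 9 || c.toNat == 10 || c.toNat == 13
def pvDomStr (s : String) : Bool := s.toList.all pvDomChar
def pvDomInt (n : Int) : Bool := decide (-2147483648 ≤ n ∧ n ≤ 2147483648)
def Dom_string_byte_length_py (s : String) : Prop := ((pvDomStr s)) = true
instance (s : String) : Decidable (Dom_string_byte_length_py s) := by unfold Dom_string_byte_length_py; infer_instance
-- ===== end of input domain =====

-- B replaces A's per-character index scan (with the +=2 jump) by a split on backslash
-- followed by a fold over the fragments with a carry flag; same result, different algorithm.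

-- ===== PORT A =====
-- A's while loop: index i over the char list, length accumulator.
def pvALoop (cs : List Char) (i : Nat) (length : Int) : Int :=
  if h : i < cs.length then
    if cs[i] = '\\' ∧ i + 1 < cs.length then
      pvALoop cs (i + 2) (length + 1)
    else
      pvALoop cs (i + 1) (length + 1)
  else length
termination_by cs.length - i

def string_byte_length_py (s : String) : Int := pvALoop s.toList 0 0

-- ===== PORT B =====
-- Source B: parts = s.split('\\'); count = len(parts[0]); then a for-loop over parts[1:]
-- with state (count, carry).  s.split('\\') is PySem.Chars.splitOn on the char list
-- (it always returns a nonempty list, so parts[0] is headD [] here).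
def string_byte_length_py_alt (s : String) : Int :=
  let parts := PySem.Chars.splitOn s.toList ['\\']
  let count : Int := ((parts.headD []).length : Int)
  (parts.tail.foldl
    (fun (st : Int × Bool) p =>
      if st.2 then (st.1 + p.length, false)
      else if p.isEmpty = false then (st.1 + p.length, false)
      else (st.1 + 1, true))
    (count, false)).1

-- ===== PRECONDITION & SPEC =====
def Spec_string_byte_length_py (s : String) (out : Int) : Prop := out = string_byte_length_py_alt s
instance (s : String) (out : Int) : Decidable (Spec_string_byte_length_py s out) := by unfold Spec_string_byte_length_py; infer_instance

-- ===== CLAIM (what is proved, stated in full; the proofs are below) =====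
def Claim_equal_string_byte_length_py : Prop := ∀ (s : String), Dom_string_byte_length_py s → Spec_string_byte_length_py s (string_byte_length_py s)

-- ===== LEMMAS AND PROOFS =====

-- Reference recursion: the escape-aware length, two characters at a time.
def pvSpec : List Char → Int
  | [] => 0
  | [_] => 1
  | c :: d :: rest => if c = '\\' then 1 + pvSpec rest else 1 + pvSpec (d :: rest)

theorem pvSpec_cons_ne (c : Char) (t : List Char) (hc : c ≠ '\\') :
    pvSpec (c :: t) = 1 + pvSpec t := by
  cases t with
  | nil => simp [pvSpec]
  | cons d r => simp [pvSpec, hc]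

-- Structural version of s.split('\\') used only in the proofs.
def pvSplit : List Char → List (List Char)
  | [] => [[]]
  | c :: rest =>
    if c = '\\' then [] :: pvSplit rest
    else
      match pvSplit rest with
      | [] => [[c]]
      | p :: ps => (c :: p) :: ps

theorem pvSplit_ne_nil (l : List Char) : pvSplit l ≠ [] := by
  cases l with
  | nil => simp [pvSplit]
  | cons c rest =>
    simp only [pvSplit]
    split_ifs
    · simp
    · cases h : pvSplit rest <;> simp

-- PySem's fuel-based splitOn.go agrees with pvSplit when the fuel suffices.
theorem pvSplitOn_go_eq (fuel : Nat) :
    ∀ (l cur : List Char) (acc : List (List Char)) (p : List Char) (ps : List (List Char)),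
      l.length ≤ fuel → pvSplit l = p :: ps →
      PySem.Chars.splitOn.go ['\\'] fuel l cur acc = acc.reverse ++ (cur.reverse ++ p) :: ps := by
  induction fuel with
  | zero =>
    intro l cur acc p ps hlen hsplit
    have hl : l = [] := List.eq_nil_of_length_eq_zero (Nat.le_zero.mp hlen)
    subst hl
    simp [pvSplit] at hsplit
    obtain ⟨hp, hps⟩ := hsplit
    subst hp; subst hps
    simp [PySem.Chars.splitOn.go]
  | succ fuel ih =>
    intro l cur acc p ps hlen hsplit
    cases l with
    | nil =>
      simp [pvSplit] at hsplit
      obtain ⟨hp, hps⟩ := hsplit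
      subst hp; subst hps
      simp [PySem.Chars.splitOn.go]
    | cons c rest =>
      by_cases hc : c = '\\'
      · subst hc
        simp only [pvSplit] at hsplit
        obtain ⟨p', ps', hrest⟩ : ∃ p' ps', pvSplit rest = p' :: ps' := by
          cases h : pvSplit rest with
          | nil => exact absurd h (pvSplit_ne_nil rest)
          | cons a b => exact ⟨a, b, rfl⟩
        rw [hrest] at hsplit
        obtain ⟨hp, hps⟩ := List.cons.injEq .. ▸ hsplit
        have hpre : List.isPrefixOf ['\\'] ('\\' :: rest) = true := by
          simp [List.isPrefixOf]
        rw [PySem.Chars.splitOn.go]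
        simp only [hpre, if_pos]
        have hdr : List.drop ['\\'].length ('\\' :: rest) = rest := rfl
        rw [hdr]
        rw [ih rest [] (cur.reverse :: acc) p' ps'
          (by simpa using Nat.le_of_succ_le_succ (by simpa using hlen)) hrest]
        simp [← hp, ← hps]
      · simp only [pvSplit, if_neg hc] at hsplit
        obtain ⟨p', ps', hrest⟩ : ∃ p' ps', pvSplit rest = p' :: ps' := by
          cases h : pvSplit rest with
          | nil => exact absurd h (pvSplit_ne_nil rest)
          | cons a b => exact ⟨a, b, rfl⟩
        rw [hrest] at hsplit
        obtain ⟨hp, hps⟩ := List.cons.injEq .. ▸ hsplit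
        have hpre : List.isPrefixOf ['\\'] (c :: rest) = false := by
          simp only [List.isPrefixOf, Bool.and_eq_false_iff, beq_eq_false_iff_ne, ne_eq]
          exact Or.inl fun hx => hc hx.symm
        rw [PySem.Chars.splitOn.go]
        simp only [hpre, Bool.false_eq_true, if_false]
        have := ih rest (c :: cur) acc p' ps'
          (by simpa using Nat.le_of_succ_le_succ (by simpa using hlen)) hrest
        rw [this]
        simp [← hp, ← hps]

theorem pvSplitOn_eq (l : List Char) : PySem.Chars.splitOn l ['\\'] = pvSplit l := by
  obtain ⟨p, ps, h⟩ : ∃ p ps, pvSplit l = p :: ps := by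
    cases h : pvSplit l with
    | nil => exact absurd h (pvSplit_ne_nil l)
    | cons a b => exact ⟨a, b, rfl⟩
  rw [PySem.Chars.splitOn]
  rw [pvSplitOn_go_eq (l.length + 1) l [] [] p ps (Nat.le_succ _) h]
  simp [h]

-- The fold step of B's loop.
def pvStep : Int × Bool → List Char → Int × Bool :=
  fun st p =>
    if st.2 then (st.1 + p.length, false)
    else if p.isEmpty = false then (st.1 + p.length, false)
    else (st.1 + 1, true)

-- Core invariant: folding B's loop over the split of m, with carry clear after the
-- head fragment was charged (C3) and over the whole split with carry clear (C2).
theorem pvFold_key (n : Nat) :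
    ∀ (m : List Char), m.length ≤ n →
      (∀ (a : Int), (List.foldl pvStep (a, false) (pvSplit m)).1 = a + pvSpec ('\\' :: m)) ∧
      (∀ (a : Int) (p : List Char) (ps : List (List Char)), pvSplit m = p :: ps →
        (List.foldl pvStep (a + p.length, false) ps).1 = a + pvSpec m) := by
  induction n with
  | zero =>
    intro m hlen
    have hm : m = [] := List.eq_nil_of_length_eq_zero (Nat.le_zero.mp hlen)
    subst hm
    constructor
    · intro a; simp [pvSplit, pvStep, pvSpec, List.foldl]
    · intro a p ps h
      simp [pvSplit] at h
      obtain ⟨hp, hps⟩ := h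
      subst hp; subst hps
      simp [pvSpec, List.foldl]
  | succ n ih =>
    intro m hlen
    -- C3 first
    have C3 : ∀ (a : Int) (p : List Char) (ps : List (List Char)), pvSplit m = p :: ps →
        (List.foldl pvStep (a + p.length, false) ps).1 = a + pvSpec m := by
      intro a p ps h
      cases m with
      | nil =>
        simp [pvSplit] at h
        obtain ⟨hp, hps⟩ := h
        subst hp; subst hps
        simp [pvSpec, List.foldl]
      | cons c rest =>
        by_cases hc : c = '\\'
        · subst hc
          simp only [pvSplit] at h
          obtain ⟨hp, hps⟩ := List.cons.injEq .. ▸ h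
          subst hps
          have h2 := (ih rest (by simpa using Nat.le_of_succ_le_succ hlen)).1 a
          simp [← hp, h2]
        · simp only [pvSplit, if_neg hc] at h
          obtain ⟨p', ps', hrest⟩ : ∃ p' ps', pvSplit rest = p' :: ps' := by
            cases hh : pvSplit rest with
            | nil => exact absurd hh (pvSplit_ne_nil rest)
            | cons x y => exact ⟨x, y, rfl⟩
          rw [hrest] at h
          obtain ⟨hp, hps⟩ := List.cons.injEq .. ▸ h
          subst hps
          have h3 := (ih rest (by simpa using Nat.le_of_succ_le_succ hlen)).2 (a + 1) p' ps' hrest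
          rw [pvSpec_cons_ne c rest hc]
          rw [← hp]
          have : (a : Int) + (c :: p').length = (a + 1) + p'.length := by
            push_cast [List.length_cons]; ring
          rw [this, h3]
          ring
    refine ⟨?_, C3⟩
    -- C2
    intro a
    obtain ⟨p, ps, h⟩ : ∃ p ps, pvSplit m = p :: ps := by
      cases hh : pvSplit m with
      | nil => exact absurd hh (pvSplit_ne_nil m)
      | cons x y => exact ⟨x, y, rfl⟩
    rw [h]
    cases hp : p with
    | cons x xs =>
      -- head fragment nonempty ⇒ m starts with a non-backslash char
      rw [List.foldl_cons]
      have hstep : pvStep (a, false) (x :: xs) = (a + (x :: xs).length, false) := by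
        simp [pvStep]
      rw [hstep]
      have := C3 a (x :: xs) ps (hp ▸ h)
      rw [this]
      -- pvSpec ('\\' :: m) = 1 + pvSpec rest-of-escape; m = x :: rest with x ≠ '\\'
      cases m with
      | nil => simp [pvSplit] at h; rw [h.1] at hp; simp at hp
      | cons c rest =>
        by_cases hc : c = '\\'
        · exfalso
          subst hc
          simp only [pvSplit] at h
          have := (List.cons.injEq .. ▸ h).1
          rw [← this] at hp; simp at hp
        · have h1 : pvSpec ('\\' :: c :: rest) = 1 + pvSpec rest := by
            simp [pvSpec]
          have h2 : pvSpec (c :: rest) = 1 + pvSpec rest := pvSpec_cons_ne c rest hc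
          rw [h1, h2]
    | nil =>
      -- head fragment empty ⇒ m = [] or m = '\\' :: rest
      cases m with
      | nil =>
        simp [pvSplit] at h
        rw [h.2]
        simp [List.foldl, pvStep, pvSpec]
      | cons c rest =>
        by_cases hc : c = '\\'
        · subst hc
          simp only [pvSplit] at h
          have hps : ps = pvSplit rest := ((List.cons.injEq .. ▸ h).2).symm
          rw [List.foldl_cons]
          have hstep : pvStep (a, false) ([] : List Char) = (a + 1, true) := by
            simp [pvStep]
          rw [hstep, hps]
          -- carry = true over pvSplit rest: charge its head fragment, then C3 at rest
          obtain ⟨q, qs, hq⟩ : ∃ q qs, pvSplit rest = q :: qs := by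
            cases hh : pvSplit rest with
            | nil => exact absurd hh (pvSplit_ne_nil rest)
            | cons x y => exact ⟨x, y, rfl⟩
          rw [hq, List.foldl_cons]
          have hstep2 : pvStep (a + 1, true) q = (a + 1 + q.length, false) := by
            simp [pvStep]
          rw [hstep2]
          have h3 := (ih rest (by simpa using Nat.le_of_succ_le_succ hlen)).2 (a + 1) q qs hq
          rw [h3]
          have h4 : pvSpec ('\\' :: '\\' :: rest) = 1 + pvSpec rest := by
            simp [pvSpec]
          rw [h4]; ring
        · exfalso
          simp only [pvSplit, if_neg hc] at h
          obtain ⟨p', ps', hrest⟩ : ∃ p' ps', pvSplit rest = p' :: ps' := by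
            cases hh : pvSplit rest with
            | nil => exact absurd hh (pvSplit_ne_nil rest)
            | cons x y => exact ⟨x, y, rfl⟩
          rw [hrest] at h
          have := (List.cons.injEq .. ▸ h).1
          rw [← this] at hp; simp at hp

-- B computes pvSpec.
theorem pvAlt_eq_spec (s : String) : string_byte_length_py_alt s = pvSpec s.toList := by
  unfold string_byte_length_py_alt
  rw [pvSplitOn_eq]
  obtain ⟨p, ps, h⟩ : ∃ p ps, pvSplit s.toList = p :: ps := by
    cases hh : pvSplit s.toList with
    | nil => exact absurd hh (pvSplit_ne_nil s.toList)
    | cons x y => exact ⟨x, y, rfl⟩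
  rw [h]
  have key := (pvFold_key s.toList.length s.toList (Nat.le_refl _)).2 0 p ps h
  simp only [List.headD_cons, List.tail_cons]
  have : ((p.length : Int), false) = ((0 : Int) + p.length, false) := by simp
  rw [this]
  have hfold : (List.foldl
      (fun (st : Int × Bool) p =>
        if st.2 then (st.1 + p.length, false)
        else if p.isEmpty = false then (st.1 + p.length, false)
        else (st.1 + 1, true)) ((0 : Int) + p.length, false) ps) =
      List.foldl pvStep ((0 : Int) + p.length, false) ps := rfl
  rw [hfold, key]
  simp

-- A computes pvSpec: the index loop over drops.
theorem pvALoop_eq_spec (cs : List Char) :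
    ∀ n i ℓ, cs.length - i ≤ n → pvALoop cs i ℓ = ℓ + pvSpec (cs.drop i) := by
  intro n
  induction n with
  | zero =>
    intro i ℓ h
    have hle : cs.length ≤ i := by omega
    rw [pvALoop]
    simp [Nat.not_lt.mpr hle, List.drop_eq_nil_of_le hle, pvSpec]
  | succ n ih =>
    intro i ℓ h
    by_cases hi : i < cs.length
    · have hdrop : cs.drop i = cs[i] :: cs.drop (i + 1) :=
        (List.drop_eq_getElem_cons hi).symm ▸ rfl
      rw [pvALoop, dif_pos hi]
      by_cases hc : cs[i] = '\\' ∧ i + 1 < cs.length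
      · have hdrop2 : cs.drop (i + 1) = cs[i + 1] :: cs.drop (i + 2) :=
          (List.drop_eq_getElem_cons hc.2).symm ▸ rfl
        rw [if_pos hc, ih (i + 2) (ℓ + 1) (by omega), hdrop, hdrop2]
        have hsp : pvSpec (cs[i] :: cs[i + 1] :: cs.drop (i + 2)) = 1 + pvSpec (cs.drop (i + 2)) := by
          simp [pvSpec, hc.1]
        rw [hsp]
        ring
      · rw [if_neg hc, ih (i + 1) (ℓ + 1) (by omega), hdrop]
        by_cases hb : cs[i] = '\\'
        · have hlast : cs.length ≤ i + 1 := by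
            rcases Nat.lt_or_ge (i + 1) cs.length with h' | h'
            · exact absurd ⟨hb, h'⟩ hc
            · exact h'
          have hnil : cs.drop (i + 1) = [] := List.drop_eq_nil_of_le hlast
          rw [hnil]
          simp [pvSpec]
        · rw [pvSpec_cons_ne _ _ hb]
          ring
    · have hle : cs.length ≤ i := Nat.not_lt.mp hi
      rw [pvALoop]
      simp [Nat.not_lt.mpr hle, List.drop_eq_nil_of_le hle, pvSpec]

theorem port_eq (s : String) : string_byte_length_py s = string_byte_length_py_alt s := by
  rw [pvAlt_eq_spec]
  have h := pvALoop_eq_spec s.toList s.toList.length 0 0 (by omega)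
  simpa [string_byte_length_py] using h

-- ===== VERDICT (by name: the statement is the Claim_ definition above) =====
theorem string_byte_length_py_spec : Claim_equal_string_byte_length_py := by
  intro s _
  unfold Spec_string_byte_length_py
  exact port_eq s
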